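-- pv_equiv track=rewrite | github.com/dengxl0520/leetcode | .lcpr/957.prison-cells-after-n-days.py | prisonAfterNDays1
-- ===== SOURCE A (Python) =====
-- from typing import List
--
-- def prisonAfterNDays1(cells: List[int], n: int) -> List[int]:
--     '''
--         暴力 TLE
--     '''
--     res = cells[:]
--     for i in range(n):
--         for j in range(1, len(cells)-1):
--             if cells[j-1] == cells[j+1]:
--                 res[j] = 1
--             else:
--                 res[j] = 0
--         if i == 0 :
--             res[0], res[-1] = 0,0
--         cells = res[:]
--     return res
-- ===== SOURCE B (Python) =====
-- from typing import List
--
-- def prisonAfterNDays1(cells: List[int], n: int) -> List[int]: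
--     '''Cycle detection: remember seen states and jump ahead by the cycle length.'''
--     def step(s):
--         new = s[:]
--         for j in range(1, len(s) - 1):
--             new[j] = 1 if s[j - 1] == s[j + 1] else 0
--         if s:
--             new[0] = new[-1] = 0
--         return new
--
--     state = cells[:]
--     seen = {}
--     day = 0
--     while day < n:
--         key = tuple(state)
--         if key in seen:
--             cycle = day - seen[key]
--             for _ in range((n - day) % cycle):
--                 state = step(state)
--             return state
--         seen[key] = day
--         state = step(state)
--         day += 1
--     return state
-- ===== Notes on version B (the rewrite author's own statement) =====
-- stated objective: alternative
-- what changed: Replaces the day-by-day brute-force simulation with cycle detection: seen states are stored in a dict and the remaining days are reduced modulo the detected cycle length, so repeated states are never re-simulated (a large board rarely repeats within the horizon, so measured cost is the same).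
-- crash fix: On empty cells with n >= 1, A raises IndexError at res[-1]; B returns []. — e.g. on prisonAfterNDays1([], 3): A raises IndexError, B returns []
import Mathlib
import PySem

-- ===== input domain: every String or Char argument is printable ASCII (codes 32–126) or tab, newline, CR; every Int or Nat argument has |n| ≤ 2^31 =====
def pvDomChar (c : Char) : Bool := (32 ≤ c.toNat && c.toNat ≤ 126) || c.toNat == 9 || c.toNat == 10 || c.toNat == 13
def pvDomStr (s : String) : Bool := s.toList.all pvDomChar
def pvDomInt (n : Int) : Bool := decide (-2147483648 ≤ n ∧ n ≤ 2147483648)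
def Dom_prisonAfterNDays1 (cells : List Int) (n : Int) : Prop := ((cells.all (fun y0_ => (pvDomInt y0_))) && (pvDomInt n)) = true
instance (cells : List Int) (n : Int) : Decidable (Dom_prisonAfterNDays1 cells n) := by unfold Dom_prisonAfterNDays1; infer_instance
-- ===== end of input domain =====

-- B replaces A's day-by-day simulation by cycle detection: a dict of seen states, and the
-- remaining days are reduced modulo the detected cycle length; equal on Pre_ (A raises
-- IndexError on empty cells with n ≥ 1, where B returns []).

-- ===== PORT A =====
-- literal transliteration of A: res = cells[:]; for i in range(n): inner loop over
-- j in range(1, len(cells)-1); zero the ends only when i == 0; cells = res[:]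
def prisonAfterNDays1 (cells : List Int) (n : Int) : List Int :=
  let st := (PySem.List.pyRange 0 n 1).foldl (fun (st : List Int × List Int) i =>
    let res := st.1
    let cells := st.2
    let res := (PySem.List.pyRange 1 ((cells.length : Int) - 1) 1).foldl (fun res j =>
      if PySem.List.pyGet? cells (j - 1) == PySem.List.pyGet? cells (j + 1) then
        PySem.List.pySetD res j 1
      else
        PySem.List.pySetD res j 0) res
    let res := if i == 0 then PySem.List.pySetD (PySem.List.pySetD res 0 0) (-1) 0 else res
    (res, res)) (cells, cells)
  st.1

-- ===== PORT B =====
-- new[j] = 1 if s[j-1] == s[j+1] else 0 (one middle cell of one day)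
def pvInnerF (s : List Int) (r : List Int) (j : Int) : List Int :=
  PySem.List.pySetD r j
    (if PySem.List.pyGet? s (j - 1) == PySem.List.pyGet? s (j + 1) then 1 else 0)

-- one day of the automaton: new = s[:]; middle cells from s; both ends zeroed (if s nonempty)
def pvStep (s : List Int) : List Int :=
  let new := (PySem.List.pyRange 1 ((s.length : Int) - 1) 1).foldl (pvInnerF s) s
  if s.isEmpty then new else PySem.List.pySetD (PySem.List.pySetD new 0 0) (-1) 0

-- for _ in range(k): state = step(state)
def pvRepeat (s : List Int) : Nat → List Int
  | 0 => s
  | k + 1 => pvRepeat (pvStep s) k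

-- while day < n: look the state up in seen; on a hit, jump ahead by (n-day) % cycle
def pvLoop (n : Int) : PySem.Dict (List Int) Int → List Int → Int → Nat → List Int
  | _, state, _, 0 => state
  | seen, state, day, fuel + 1 =>
    match PySem.Dict.get? seen state with
    | some d0 =>
        let cycle := day - d0
        pvRepeat state (PySem.Int.mod (n - day) cycle).toNat
    | none => pvLoop n (seen.insert state day) (pvStep state) (day + 1) fuel

def prisonAfterNDays1_alt (cells : List Int) (n : Int) : List Int :=
  pvLoop n PySem.Dict.empty cells 0 n.toNat

-- ===== PRECONDITION & SPEC =====
-- Pre_ excludes only empty cells with n ≥ 1, where A raises IndexError at res[-1].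
def Pre_prisonAfterNDays1 (cells : List Int) (n : Int) : Prop := cells ≠ [] ∨ n ≤ 0
instance (cells : List Int) (n : Int) : Decidable (Pre_prisonAfterNDays1 cells n) := by
  unfold Pre_prisonAfterNDays1; infer_instance
def pvWitness_prisonAfterNDays1 : List Int × Int := ([0, 1, 0, 1, 1, 0, 0, 1], 7)

-- On empty cells with n ≥ 1, A raises IndexError at res[-1]; B returns []
-- (made checkable by prisonAfterNDays1_raises at the bottom of the file).
def Raises_prisonAfterNDays1 (cells : List Int) (n : Int) : Prop := cells = [] ∧ 1 ≤ n
instance (cells : List Int) (n : Int) : Decidable (Raises_prisonAfterNDays1 cells n) := by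
  unfold Raises_prisonAfterNDays1; infer_instance
def pvRaiseWitness_prisonAfterNDays1 : List Int × Int := ([], 3)
def pvRaiseWitnessOut_prisonAfterNDays1 : List Int := []

def Spec_prisonAfterNDays1 (cells : List Int) (n : Int) (out : List Int) : Prop := out = prisonAfterNDays1_alt cells n
instance (cells : List Int) (n : Int) (out : List Int) : Decidable (Spec_prisonAfterNDays1 cells n out) := by unfold Spec_prisonAfterNDays1; infer_instance

-- ===== CLAIM (what is proved, stated in full; the proofs are below) =====
def Claim_equal_prisonAfterNDays1 : Prop := ∀ (cells : List Int) (n : Int), Dom_prisonAfterNDays1 cells n → Pre_prisonAfterNDays1 cells n → Spec_prisonAfterNDays1 cells n (prisonAfterNDays1 cells n)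
def Claim_raises_prisonAfterNDays1 : Prop := (∀ (cells : List Int) (n : Int), Dom_prisonAfterNDays1 cells n → Raises_prisonAfterNDays1 cells n → ¬ Pre_prisonAfterNDays1 cells n) ∧ (Dom_prisonAfterNDays1 (pvRaiseWitness_prisonAfterNDays1.1) (pvRaiseWitness_prisonAfterNDays1.2) ∧ Raises_prisonAfterNDays1 (pvRaiseWitness_prisonAfterNDays1.1) (pvRaiseWitness_prisonAfterNDays1.2) ∧ prisonAfterNDays1_alt (pvRaiseWitness_prisonAfterNDays1.1) (pvRaiseWitness_prisonAfterNDays1.2) = pvRaiseWitnessOut_prisonAfterNDays1)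

-- ===== LEMMAS AND PROOFS =====

theorem pvInnerF_eq (s : List Int) :
    (fun res j =>
      if PySem.List.pyGet? s (j - 1) == PySem.List.pyGet? s (j + 1) then
        PySem.List.pySetD res j 1
      else
        PySem.List.pySetD res j 0) = pvInnerF s := by
  funext r j
  by_cases h : PySem.List.pyGet? s (j - 1) == PySem.List.pyGet? s (j + 1) <;>
    simp [pvInnerF, h]

theorem pvInner_length (s : List Int) : ∀ (l : List Int) (r : List Int),
    (l.foldl (pvInnerF s) r).length = r.length := by
  intro l
  induction l with
  | nil => intro r; rfl
  | cons j t ih =>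
      intro r
      simp [List.foldl_cons, ih, pvInnerF, PySem.List.length_pySetD]

theorem pvSetD_neg_one (r : List Int) (v : Int) (h : r ≠ []) :
    PySem.List.pySetD r (-1) v = r.set (r.length - 1) v := by
  have : 1 ≤ r.length := List.length_pos_iff.mpr h
  simp [PySem.List.pySetD, PySem.List.pySet?, PySem.List.pyIdx?, this]

theorem pvSet_getElem?_self (l : List Int) (i : Nat) (a : Int) (h : l[i]? = some a) :
    l.set i a = l := by
  have hi : i < l.length := by
    by_contra hni
    rw [List.getElem?_eq_none (by omega)] at h
    exact Option.some_ne_none a h.symm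
  apply List.ext_getElem?
  intro k
  by_cases hk : k = i
  · subst hk
    rw [List.getElem?_set_self', h]
    simp
  · simp [List.getElem?_set_ne (by omega : i ≠ k)]

theorem pvStep_length (s : List Int) : (pvStep s).length = s.length := by
  unfold pvStep
  have h := pvInner_length s (PySem.List.pyRange 1 ((s.length : Int) - 1) 1) s
  by_cases he : s.isEmpty <;>
    simp [he, PySem.List.length_pySetD, h]

theorem pvInner_ends (s : List Int) : ∀ (l : List Int) (r : List Int),
    r.length = s.length → (∀ j ∈ l, 1 ≤ j ∧ j + 1 < (s.length : Int)) →
    (l.foldl (pvInnerF s) r)[0]? = r[0]? ∧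
      (l.foldl (pvInnerF s) r)[s.length - 1]? = r[s.length - 1]? := by
  intro l
  induction l with
  | nil => intro r _ _; exact ⟨rfl, rfl⟩
  | cons j t ih =>
      intro r hlen hmem
      obtain ⟨hj1, hj2⟩ := hmem j (List.mem_cons_self)
      have hset : pvInnerF s r j =
          r.set j.toNat (if PySem.List.pyGet? s (j - 1) == PySem.List.pyGet? s (j + 1) then 1 else 0) := by
        simp [pvInnerF, PySem.List.pySetD_of_nonneg r _ (by omega : (0:Int) ≤ j)]
      have hlen' : (pvInnerF s r j).length = s.length := by
        rw [hset, List.length_set]; exact hlen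
      have h := ih (pvInnerF s r j) hlen' (fun x hx => hmem x (List.mem_cons_of_mem j hx))
      rw [List.foldl_cons]
      have hne0 : j.toNat ≠ 0 := by omega
      have hneL : j.toNat ≠ s.length - 1 := by omega
      refine ⟨?_, ?_⟩
      · rw [h.1, hset, List.getElem?_set_ne (by omega)]
      · rw [h.2, hset, List.getElem?_set_ne (by omega)]

theorem pvStep_ends (s : List Int) (hs : s ≠ []) :
    (pvStep s)[0]? = some 0 ∧ (pvStep s)[s.length - 1]? = some 0 := by
  have hL : 1 ≤ s.length := List.length_pos_iff.mpr hs
  have hInner := pvInner_length s (PySem.List.pyRange 1 ((s.length : Int) - 1) 1) s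
  have hie : s.isEmpty = false := by simp [hs]
  unfold pvStep
  rw [hie]
  simp only [Bool.false_eq_true, if_false]
  set new := (PySem.List.pyRange 1 ((s.length : Int) - 1) 1).foldl (pvInnerF s) s with hnew
  have hset0 : PySem.List.pySetD new 0 0 = new.set 0 0 := by
    simpa using PySem.List.pySetD_of_nonneg new (0:Int) (by omega : (0:Int) ≤ (0:Int))
  have hlen0 : (new.set 0 0).length = s.length := by rw [List.length_set]; exact hInner
  have hne : new.set 0 0 ≠ [] := by
    intro hc; rw [hc] at hlen0; simp at hlen0; omega
  rw [hset0, pvSetD_neg_one _ _ hne, hlen0]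
  constructor
  · by_cases h1 : s.length = 1
    · rw [h1]
      exact List.getElem?_set_self (by simp [hlen0]; omega)
    · rw [List.getElem?_set_ne (by omega)]
      exact List.getElem?_set_self (by simp [hInner]; omega)
  · exact List.getElem?_set_self (by simp [hlen0]; omega)

theorem pvStep_of_ends_zero (s : List Int) (hs : s ≠ [])
    (h0 : s[0]? = some 0) (h1 : s[s.length - 1]? = some 0) :
    (PySem.List.pyRange 1 ((s.length : Int) - 1) 1).foldl (pvInnerF s) s = pvStep s := by
  have hL : 1 ≤ s.length := List.length_pos_iff.mpr hs
  have hie : s.isEmpty = false := by simp [hs]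
  have hInner := pvInner_length s (PySem.List.pyRange 1 ((s.length : Int) - 1) 1) s
  have hends := pvInner_ends s (PySem.List.pyRange 1 ((s.length : Int) - 1) 1) s rfl
    (by
      intro j hj
      rw [PySem.List.mem_pyRange_one] at hj
      omega)
  conv_rhs => unfold pvStep
  rw [hie]
  simp only [Bool.false_eq_true, if_false]
  set new := (PySem.List.pyRange 1 ((s.length : Int) - 1) 1).foldl (pvInnerF s) s with hnew
  have hn0 : new[0]? = some 0 := by rw [hends.1, h0]
  have hn1 : new[s.length - 1]? = some 0 := by rw [hends.2, h1]
  have hset0 : PySem.List.pySetD new 0 0 = new := by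
    rw [show ((0:Int)) = ((0:Nat) : Int) from rfl, PySem.List.pySetD_natCast]
    exact pvSet_getElem?_self new 0 0 hn0
  rw [hset0]
  have hne : new ≠ [] := by
    intro hc; rw [hc] at hInner; simp at hInner; omega
  rw [pvSetD_neg_one new 0 hne, hInner]
  exact (pvSet_getElem?_self new (s.length - 1) 0 hn1).symm

-- A's outer-loop body, with the inner loop written via pvInnerF
def pvAF (st : List Int × List Int) (i : Int) : List Int × List Int :=
  let res := (PySem.List.pyRange 1 ((st.2.length : Int) - 1) 1).foldl (pvInnerF st.2) st.1
  let res := if i == 0 then PySem.List.pySetD (PySem.List.pySetD res 0 0) (-1) 0 else res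
  (res, res)

theorem pvA_foldl (cells : List Int) (n : Int) :
    prisonAfterNDays1 cells n = ((PySem.List.pyRange 0 n 1).foldl pvAF (cells, cells)).1 := by
  unfold prisonAfterNDays1 pvAF
  simp only [pvInnerF_eq]

theorem pvAF_zero (c : List Int) (hc : c ≠ []) : pvAF (c, c) 0 = (pvStep c, pvStep c) := by
  have hie : c.isEmpty = false := by simp [hc]
  simp [pvAF, pvStep, hie]

theorem pvAF_succ (t : List Int) (i : Int) (hi : i ≠ 0) (ht : t ≠ []) :
    pvAF (pvStep t, pvStep t) i = (pvStep (pvStep t), pvStep (pvStep t)) := by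
  have hlen : (pvStep t).length = t.length := pvStep_length t
  have hne : pvStep t ≠ [] := by
    intro hcon
    rw [hcon] at hlen
    simp at hlen
    exact ht (List.length_eq_zero_iff.mp hlen.symm)
  have hends := pvStep_ends t ht
  have h0 : (pvStep t)[0]? = some 0 := hends.1
  have h1 : (pvStep t)[(pvStep t).length - 1]? = some 0 := by rw [hlen]; exact hends.2
  have hform := pvStep_of_ends_zero (pvStep t) hne h0 h1
  simp only [pvAF, hform]
  simp [hi]

theorem pvA_tail : ∀ (m : Nat) (a : Int), 1 ≤ a → ∀ (t : List Int), t ≠ [] →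
    (PySem.List.pyRange a (a + (m : Int)) 1).foldl pvAF (pvStep t, pvStep t)
      = (pvStep^[m] (pvStep t), pvStep^[m] (pvStep t)) := by
  intro m
  induction m with
  | zero =>
      intro a _ t _
      rw [PySem.List.pyRange_one_eq_nil (by omega : a + ((0:Nat):Int) ≤ a)]
      rfl
  | succ k ih =>
      intro a ha t ht
      have hcons : PySem.List.pyRange a (a + ((k+1 : Nat) : Int)) 1
          = a :: PySem.List.pyRange (a + 1) (a + ((k+1 : Nat) : Int)) 1 :=
        PySem.List.pyRange_one_cons (by push_cast; omega)
      have hb : a + ((k+1 : Nat) : Int) = (a + 1) + ((k : Nat) : Int) := by push_cast; omega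
      have hne : pvStep t ≠ [] := by
        have hlen : (pvStep t).length = t.length := pvStep_length t
        intro hcon
        rw [hcon] at hlen
        simp at hlen
        exact ht (List.length_eq_zero_iff.mp hlen.symm)
      rw [hcons, List.foldl_cons, pvAF_succ t a (by omega) ht, hb,
        ih (a + 1) (by omega) (pvStep t) hne]
      rw [← Function.iterate_succ_apply]

theorem pvA_eq_iterate (cells : List Int) (n : Int) (hc : cells ≠ []) (hn : 1 ≤ n) :
    prisonAfterNDays1 cells n = pvStep^[n.toNat] cells := by
  rw [pvA_foldl]
  rw [PySem.List.pyRange_one_cons (by omega : (0:Int) < n), List.foldl_cons, pvAF_zero cells hc]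
  have hrange : PySem.List.pyRange (0 + 1) n 1
      = PySem.List.pyRange 1 (1 + ((n - 1).toNat : Int)) 1 := by
    congr 1
    omega
  rw [hrange, pvA_tail (n - 1).toNat 1 (le_refl 1) cells hc]
  have hfin : (n - 1).toNat.succ = n.toNat := by omega
  rw [← Function.iterate_succ_apply]
  simp only [Nat.succ_eq_add_one] at hfin ⊢
  rw [hfin]

theorem pvRepeat_eq_iterate : ∀ (k : Nat) (s : List Int), pvRepeat s k = pvStep^[k] s := by
  intro k
  induction k with
  | zero => intro s; rfl
  | succ m ih =>
      intro s
      simp [pvRepeat, ih, Function.iterate_succ_apply]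

theorem pvPeriodic (c : List Int) (a p : Nat) (hp : pvStep^[a + p] c = pvStep^[a] c) :
    ∀ (m : Nat), a ≤ m → pvStep^[m + p] c = pvStep^[m] c := by
  intro m hm
  obtain ⟨k, rfl⟩ := Nat.exists_eq_add_of_le hm
  have h1 : a + k + p = k + (a + p) := by omega
  have h2 : k + a = a + k := by omega
  rw [h1, Function.iterate_add_apply, hp, ← Function.iterate_add_apply, h2]

theorem pvPeriodicMul (c : List Int) (a p : Nat) (hp : pvStep^[a + p] c = pvStep^[a] c) :
    ∀ (q : Nat) (m : Nat), a ≤ m → pvStep^[m + q * p] c = pvStep^[m] c := by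
  intro q
  induction q with
  | zero => intro m _; simp
  | succ r ih =>
      intro m hm
      have h1 : m + (r + 1) * p = (m + r * p) + p := by ring
      rw [h1, pvPeriodic c a p hp (m + r * p) (by omega), ih m hm]

theorem pvLoop_eq_iterate (c : List Int) (n : Int) : ∀ (fuel : Nat) (seen : PySem.Dict (List Int) Int) (day : Int),
    0 ≤ day → day + fuel = n →
    (∀ s d, seen.get? s = some d → 0 ≤ d ∧ d < day ∧ pvStep^[d.toNat] c = s) →
    pvLoop n seen (pvStep^[day.toNat] c) day fuel = pvStep^[n.toNat] c := by
  intro fuel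
  induction fuel with
  | zero =>
      intro seen day hday hsum _
      have : day.toNat = n.toNat := by omega
      rw [pvLoop, this]
  | succ f ih =>
      intro seen day hday hsum hinv
      rw [pvLoop]
      cases hget : PySem.Dict.get? seen (pvStep^[day.toNat] c) with
      | none =>
          have hstate : pvStep (pvStep^[day.toNat] c) = pvStep^[(day + 1).toNat] c := by
            have : (day + 1).toNat = day.toNat + 1 := by omega
            rw [this, Function.iterate_succ_apply']
          rw [hstate]
          apply ih (seen.insert (pvStep^[day.toNat] c) day) (day + 1) (by omega) (by omega)
          intro s d hd
          rw [PySem.Dict.get?_insert] at hd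
          by_cases hs : s = pvStep^[day.toNat] c
          · rw [if_pos hs] at hd
            have hdd : d = day := (Option.some_inj.mp hd).symm
            subst hdd
            exact ⟨by omega, by omega, hs.symm⟩
          · rw [if_neg hs] at hd
            obtain ⟨h1, h2, h3⟩ := hinv s d hd
            exact ⟨h1, by omega, h3⟩
      | some d0 =>
          obtain ⟨hd0, hdlt, hiter⟩ := hinv (pvStep^[day.toNat] c) d0 hget
          simp only []
          rw [pvRepeat_eq_iterate]
          have hp : (0:Int) < day - d0 := by omega
          set p : Int := day - d0 with hpdef
          set rem : Int := PySem.Int.mod (n - day) p with hremdef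
          have hrem0 : 0 ≤ rem := PySem.Int.mod_nonneg (n - day) hp
          have hremlt : rem < p := PySem.Int.mod_lt (n - day) hp
          set q : Int := PySem.Int.floordiv (n - day) p with hqdef
          have hqp : q * p + rem = n - day := PySem.Int.floordiv_mul_add_mod (n - day) p
          have hq0 : 0 ≤ q := by
            by_contra hneg
            have hq1 : q ≤ -1 := by omega
            have : q * p ≤ -1 * p := mul_le_mul_of_nonneg_right hq1 hp.le
            omega
          have hqpcast : q * p = ((q.toNat * p.toNat : Nat) : Int) := by
            push_cast [Int.toNat_of_nonneg hq0, Int.toNat_of_nonneg hp.le]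
            ring
          have hbase : pvStep^[d0.toNat + p.toNat] c = pvStep^[d0.toNat] c := by
            have : d0.toNat + p.toNat = day.toNat := by omega
            rw [this, ← hiter]
          have hsplit : n.toNat = (day.toNat + rem.toNat) + q.toNat * p.toNat := by omega
          rw [← Function.iterate_add_apply]
          have harg : rem.toNat + day.toNat = day.toNat + rem.toNat := by omega
          rw [harg, hsplit,
            pvPeriodicMul c d0.toNat p.toNat hbase q.toNat (day.toNat + rem.toNat) (by omega)]

theorem pvAlt_eq_iterate (cells : List Int) (n : Int) (hn : 1 ≤ n) :
    prisonAfterNDays1_alt cells n = pvStep^[n.toNat] cells := by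
  have h := pvLoop_eq_iterate cells n n.toNat PySem.Dict.empty 0 (le_refl 0)
    (by omega)
    (by intro s d hd; simp [PySem.Dict.get?_empty] at hd)
  simpa [prisonAfterNDays1_alt] using h

-- ===== VERDICT (by name: the statement is the Claim_ definition above) =====
theorem prisonAfterNDays1_spec : Claim_equal_prisonAfterNDays1 := by
  intro cells n _ hpre
  unfold Spec_prisonAfterNDays1
  by_cases hn : n ≤ 0
  · have hA : prisonAfterNDays1 cells n = cells := by
      simp [prisonAfterNDays1, PySem.List.pyRange_one_eq_nil hn]
    have hB : prisonAfterNDays1_alt cells n = cells := by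
      have : n.toNat = 0 := by omega
      simp [prisonAfterNDays1_alt, this, pvLoop]
    rw [hA, hB]
  · have hn1 : 1 ≤ n := by omega
    have hc : cells ≠ [] := by
      rcases hpre with h | h
      · exact h
      · omega
    rw [pvA_eq_iterate cells n hc hn1, pvAlt_eq_iterate cells n hn1]

theorem prisonAfterNDays1_raises : Claim_raises_prisonAfterNDays1 := by
  unfold Claim_raises_prisonAfterNDays1
  constructor
  · intro cells n _ hr hpre
    rcases hr with ⟨h1, h2⟩
    rcases hpre with h | h
    · exact h h1
    · omega
  · exact ⟨by decide, by decide, by decide⟩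

-- witness self-check: the value prisonAfterNDays1_raises pins for B at the raise witness
theorem pvRaiseWitnessOut_ok : prisonAfterNDays1_alt ([] : List Int) 3 = pvRaiseWitnessOut_prisonAfterNDays1 :=
  prisonAfterNDays1_raises.2.2.2
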